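-- pv_equiv track=rewrite | github.com/Kalliadickal/Academic-Progression-Guide | test/project.py | get_allfailed_list
-- ===== SOURCE A (Python) =====
-- def get_allfailed_list(rollmark):
--     # Funcition accepting marks of all students and printing the list of failed
--     # students and returning a list of the failed students
--
--     fail_list=[]
--     absent=[]
--     for i in rollmark:
--         for j in i[1]:
--                 if j<40:
--                     if(j==-1):
--                         if i[0] not in absent:
--                             absent.append(i[0])
--                     else:
--                         if i[0] not in fail_list:
--                             fail_list.append(i[0])
--
--     return [fail_list,absent]
-- ===== SOURCE B (Python) =====
-- def get_allfailed_list(rollmark):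
--     # Two independent passes: per-student any() aggregation, dedup of repeated
--     # rolls (A's 'not in' behaviour) via dict.fromkeys preserving first occurrence.
--     fail_list = list(dict.fromkeys(
--         r for r, ms in rollmark if any(m < 40 and m != -1 for m in ms)))
--     absent = list(dict.fromkeys(
--         r for r, ms in rollmark if any(m == -1 for m in ms)))
--     return [fail_list, absent]
-- ===== Notes on version B (the rewrite author's own statement) =====
-- stated objective: faster
-- what changed: Replaces A's single fused loop with interleaved O(k) 'not in' membership-dedup appends by two independent declarative passes: a per-student any() predicate selects rolls and dict.fromkeys deduplicates by hashing in first-occurrence order.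
import Mathlib
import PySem

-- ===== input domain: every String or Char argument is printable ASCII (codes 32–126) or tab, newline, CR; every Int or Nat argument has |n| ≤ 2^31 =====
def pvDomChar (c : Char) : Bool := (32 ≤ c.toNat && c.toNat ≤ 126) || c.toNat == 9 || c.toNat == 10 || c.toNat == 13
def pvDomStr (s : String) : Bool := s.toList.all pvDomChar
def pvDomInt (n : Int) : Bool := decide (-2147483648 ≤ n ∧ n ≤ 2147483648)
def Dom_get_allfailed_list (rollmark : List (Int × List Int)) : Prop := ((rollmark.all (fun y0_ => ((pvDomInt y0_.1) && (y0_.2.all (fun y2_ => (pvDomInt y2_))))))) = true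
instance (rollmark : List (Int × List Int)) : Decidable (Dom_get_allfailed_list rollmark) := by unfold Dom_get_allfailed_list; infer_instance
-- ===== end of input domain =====

-- B keeps A's behaviour but computes each list in its own declarative pass (filter by any() + hash-based first-occurrence dedup) instead of A's fused loop with linear-scan dedup; measured faster.

-- ===== PORT A =====
-- append x unless already present ('if i[0] not in l: l.append(i[0])')
def pvIns (x : Int) (l : List Int) : List Int := if x ∈ l then l else l ++ [x]

def get_allfailed_list (rollmark : List (Int × List Int)) : List (List Int) :=
  let st := rollmark.foldl
    (fun (st : List Int × List Int) i =>
      i.2.foldl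
        (fun st j =>
          if j < 40 then
            if j = -1 then (st.1, pvIns i.1 st.2)
            else (pvIns i.1 st.1, st.2)
          else st)
        st)
    ([], [])
  [st.1, st.2]

-- ===== PORT B =====
-- list(dict.fromkeys(...)): distinct keys in first-occurrence order
def pvDedup (l : List Int) : List Int :=
  l.foldl (fun acc x => if x ∈ acc then acc else acc ++ [x]) []

def get_allfailed_list_alt (rollmark : List (Int × List Int)) : List (List Int) :=
  let fail_list := pvDedup (((rollmark.filter
      (fun i => i.2.any (fun m => decide (m < 40) && decide (m ≠ -1)))).map Prod.fst))
  let absent := pvDedup (((rollmark.filter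
      (fun i => i.2.any (fun m => decide (m = -1)))).map Prod.fst))
  [fail_list, absent]

-- ===== PRECONDITION & SPEC =====
def Spec_get_allfailed_list (rollmark : List (Int × List Int)) (out : List (List Int)) : Prop := out = get_allfailed_list_alt rollmark
instance (rollmark : List (Int × List Int)) (out : List (List Int)) : Decidable (Spec_get_allfailed_list rollmark out) := by unfold Spec_get_allfailed_list; infer_instance

-- ===== CLAIM (what is proved, stated in full; the proofs are below) =====
def Claim_equal_get_allfailed_list : Prop := ∀ (rollmark : List (Int × List Int)), Dom_get_allfailed_list rollmark → Spec_get_allfailed_list rollmark (get_allfailed_list rollmark)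

-- ===== LEMMAS AND PROOFS =====

theorem pvIns_idem (x : Int) (l : List Int) : pvIns x (pvIns x l) = pvIns x l := by
  simp only [pvIns]
  split_ifs with h1 h2 <;> simp_all

-- the inner fold over one student's marks only ever inserts i, so it reduces to two any-tests
theorem inner_fold_eq (x : Int) (ms : List Int) (f a : List Int) :
    ms.foldl
      (fun (st : List Int × List Int) j =>
        if j < 40 then
          if j = -1 then (st.1, pvIns x st.2)
          else (pvIns x st.1, st.2)
        else st)
      (f, a)
    = ((if ms.any (fun m => decide (m < 40) && decide (m ≠ -1)) then pvIns x f else f),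
       (if ms.any (fun m => decide (m = -1)) then pvIns x a else a)) := by
  induction ms generalizing f a with
  | nil => simp
  | cons m ms ih =>
    by_cases h1 : m < 40
    · by_cases h2 : m = -1
      · simp [List.foldl_cons, h2, ih, pvIns_idem]
      · simp [List.foldl_cons, h1, h2, ih, pvIns_idem]
    · have h2 : m ≠ -1 := by omega
      simp [List.foldl_cons, h1, h2, ih]

-- selective pvIns-fold over students = pvDedup-fold over filtered rolls
theorem select_fold_eq (p : Int × List Int → Bool) (rm : List (Int × List Int)) (f : List Int) :
    rm.foldl (fun f i => if p i then pvIns i.1 f else f) f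
    = ((rm.filter p).map Prod.fst).foldl (fun acc x => if x ∈ acc then acc else acc ++ [x]) f := by
  induction rm generalizing f with
  | nil => rfl
  | cons i rm ih =>
    by_cases h : p i
    · simp only [List.foldl_cons, List.filter_cons, h, if_true, List.map_cons]
      exact ih (pvIns i.1 f)
    · simp [h, ih]

-- the outer fold splits into two independent component folds
theorem outer_fold_eq (rm : List (Int × List Int)) (f a : List Int) :
    rm.foldl
      (fun (st : List Int × List Int) i =>
        i.2.foldl
          (fun st j =>
            if j < 40 then
              if j = -1 then (st.1, pvIns i.1 st.2)
              else (pvIns i.1 st.1, st.2)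
            else st)
          st)
      (f, a)
    = (rm.foldl (fun f i => if i.2.any (fun m => decide (m < 40) && decide (m ≠ -1)) then pvIns i.1 f else f) f,
       rm.foldl (fun a i => if i.2.any (fun m => decide (m = -1)) then pvIns i.1 a else a) a) := by
  induction rm generalizing f a with
  | nil => rfl
  | cons i rm ih =>
    simp only [List.foldl_cons, inner_fold_eq]
    rw [ih]

-- ===== VERDICT (by name: the statement is the Claim_ definition above) =====
theorem get_allfailed_list_spec : Claim_equal_get_allfailed_list := by
  intro rm _
  show _ = _
  simp only [get_allfailed_list, get_allfailed_list_alt, pvDedup]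
  rw [outer_fold_eq, select_fold_eq, select_fold_eq]
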